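-- pv_equiv track=rewrite | github.com/KalkiEshwarD/VIT_BCSE101E | topic_5/M1/ex5.py | max_3
-- ===== SOURCE A (Python) =====
-- def max_finder(input_list):
--     """
--     INPUT:      List with elements as integers
--     OUTPUT:     max_int
--
--     DESCRIPTION:    This function takes in the input in the form of a list and then gives the output of the maximum integer that is found in the list.
--     """
--
--     max_int = input_list[0]
--
--     for number in input_list:
--         if number > max_int:
--             max_int = number
--
--     return max_int
--
-- def max_3(input_list):
--     """
--     INPUT:      List with elements as integers
--     OUTPUT:     Integer
--
--     DESCRIPTION:    This function takes in a list of integers as an input and then returns the sum of the first three high valued integers in the list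
--     """
--     compute_list = input_list.copy()
--     max_sum = 0
--
--     i = 0
--     while i < 3:
--         max_val = max_finder(compute_list)
--         max_sum += max_val
--         for index in range(len(compute_list) - 1, -1, -1):
--             if compute_list[index] == max_val:
--                 compute_list = compute_list[:index] + compute_list[index + 1:]
--                 i += 1
--
--     return max_sum
-- ===== SOURCE B (Python) =====
-- def max_3(input_list):
--     """Sum of the distinct values, largest first, until at least three
--     occurrences (counted with multiplicity) have been consumed."""
--     total = 0
--     removed = 0
--     for val in sorted(set(input_list), reverse=True):
--         total += val
--         removed += input_list.count(val)
--         if removed >= 3: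
--             break
--     return total
-- ===== Notes on version B (the rewrite author's own statement) =====
-- stated objective: faster
-- what changed: A repeatedly re-scans the shrinking list for its max and deletes occurrences one quadratic slice-rebuild at a time; B sorts the distinct values once (descending) and walks them, adding each once and advancing the removed-counter by its count in the original list.
import Mathlib
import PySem

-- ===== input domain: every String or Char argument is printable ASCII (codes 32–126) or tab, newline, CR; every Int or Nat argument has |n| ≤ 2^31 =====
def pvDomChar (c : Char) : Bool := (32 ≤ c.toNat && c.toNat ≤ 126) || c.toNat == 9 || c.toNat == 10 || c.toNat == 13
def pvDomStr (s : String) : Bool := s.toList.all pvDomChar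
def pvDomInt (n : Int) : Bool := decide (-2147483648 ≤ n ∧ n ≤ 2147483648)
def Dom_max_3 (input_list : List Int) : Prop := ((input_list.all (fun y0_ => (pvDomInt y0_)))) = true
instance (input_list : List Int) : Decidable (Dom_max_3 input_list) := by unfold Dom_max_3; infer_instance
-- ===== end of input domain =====

-- B replaces A's repeated max-scan-and-slice-delete passes with one descending sort of the
-- distinct values walked once (objective: faster, measured).


-- ===== PORT A =====
-- max_finder: max_int = input_list[0]; for number in input_list: if number > max_int: …
-- (input_list[0] raises IndexError on []; that case lies outside Pre_max_3, 0 is a dummy)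
def maxFinder (input_list : List Int) : Int :=
  match input_list with
  | [] => 0
  | h :: _ => input_list.foldl (fun m n => if n > m then n else m) h

-- one step of the inner 'for index in range(len(compute_list)-1, -1, -1)' loop;
-- state = (compute_list, i); the pyGet? 'none' branch is unreachable (indices stay in range
-- because elements are only removed at positions ≥ the current index)
def stepA (mv : Int) (st : List Int × Int) (idx : Int) : List Int × Int :=
  match PySem.List.pyGet? st.1 idx with
  | some v =>
      if v = mv then
        (PySem.List.slice st.1 none (some idx) ++ PySem.List.slice st.1 (some (idx + 1)) none,
         st.2 + 1)
      else st
  | none => st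

def removePass (cl : List Int) (mv : Int) (i : Int) : List Int × Int :=
  (PySem.List.pyRange ((cl.length : Int) - 1) (-1) (-1)).foldl (stepA mv) (cl, i)

-- the outer 'while i < 3' loop; fuel is only a totality guard: whenever the list is nonempty
-- each round removes at least one element, so length + 1 rounds always suffice
def loopA : Nat → List Int → Int → Int → Int
  | 0, _, msum, _ => msum
  | fuel + 1, cl, msum, i =>
    if i < 3 then
      let mv := maxFinder cl
      let st := removePass cl mv i
      loopA fuel st.1 (msum + mv) st.2
    else msum

def max_3 (input_list : List Int) : Int :=
  loopA (input_list.length + 1) input_list 0 0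

-- ===== PORT B =====
-- 'for val in sorted(set(input_list), reverse=True): …'
def goB (orig : List Int) : List Int → Int → Int → Int
  | [], total, _ => total
  | v :: rest, total, removed =>
    let total' := total + v
    let removed' := removed + (PySem.List.count orig v : Int)
    if 3 ≤ removed' then total' else goB orig rest total' removed'

def max_3_alt (input_list : List Int) : Int :=
  goB input_list
    (PySem.List.sorted (PySem.Set.ofList input_list) (fun x => x) true) 0 0

-- ===== PRECONDITION & SPEC =====
-- A raises IndexError (max_finder on an exhausted list) exactly when the list has < 3 elements
def Pre_max_3 (input_list : List Int) : Prop := 3 ≤ input_list.length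
instance (input_list : List Int) : Decidable (Pre_max_3 input_list) := by
  unfold Pre_max_3; infer_instance

def pvWitness_max_3 : List Int := [4, 1, 4, 2]

def Spec_max_3 (input_list : List Int) (out : Int) : Prop := out = max_3_alt input_list
instance (input_list : List Int) (out : Int) : Decidable (Spec_max_3 input_list out) := by
  unfold Spec_max_3; infer_instance

-- ===== CLAIM (what is proved, stated in full; the proofs are below) =====
def Claim_equal_max_3 : Prop := ∀ (input_list : List Int), Dom_max_3 input_list →
  Pre_max_3 input_list → Spec_max_3 input_list (max_3 input_list)

-- ===== LEMMAS AND PROOFS =====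

theorem maxFinder_cons (h : Int) (t : List Int) :
    maxFinder (h :: t) = t.foldl max h := by
  have : (fun (m n : Int) => if n > m then n else m) = max := by
    funext m n
    by_cases hc : n > m <;> simp [hc] <;> omega
  simp [maxFinder, this]

theorem maxFinder_mem (h : Int) (t : List Int) : maxFinder (h :: t) ∈ h :: t := by
  rw [maxFinder_cons]
  rcases PySem.List.foldl_max_mem t h with hh | ht
  · rw [hh]; exact List.mem_cons_self
  · exact List.mem_cons_of_mem _ ht

theorem maxFinder_ub (h : Int) (t : List Int) :
    ∀ x ∈ h :: t, x ≤ maxFinder (h :: t) := by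
  rw [maxFinder_cons]
  intro x hx
  rcases List.mem_cons.mp hx with rfl | hx
  · exact (PySem.List.le_foldl_max t x).1
  · exact (PySem.List.le_foldl_max t h).2 x hx

-- the inner descending index loop removes exactly the occurrences of mv,
-- and advances i by their number (zs: untouched suffix beyond the scanned indices)
theorem removePass_core (mv : Int) (ys : List Int) : ∀ (zs : List Int) (i : Int),
    (PySem.List.pyRange ((ys.length : Int) - 1) (-1) (-1)).foldl (stepA mv) (ys ++ zs, i)
      = (ys.filter (fun x => decide (x ≠ mv)) ++ zs, i + (ys.count mv : Int)) := by
  induction ys using List.reverseRecOn with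
  | nil =>
      intro zs i
      rw [PySem.List.pyRange_neg_one_eq_nil (by simp)]
      simp
  | append_singleton ys' a ih =>
      intro zs i
      have hlen : ((ys' ++ [a]).length : Int) - 1 = (ys'.length : Int) := by
        simp
      rw [hlen, PySem.List.pyRange_neg_one_cons (by omega), List.foldl_cons]
      have hget : PySem.List.pyGet? (ys' ++ [a] ++ zs) ((ys'.length : Int)) = some a := by
        rw [List.append_assoc, List.singleton_append]
        exact PySem.List.pyGet?_append_length ys' zs a
      by_cases hav : a = mv
      · subst hav
        have hs1 : PySem.List.slice (ys' ++ [a] ++ zs) none (some ((ys'.length : Nat) : Int)) = ys' := by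
          rw [PySem.List.slice_to_natCast, List.append_assoc]
          exact List.take_left' rfl
        have hs2 : PySem.List.slice (ys' ++ [a] ++ zs) (some ((ys'.length : Int) + 1)) none = zs := by
          have hc : (ys'.length : Int) + 1 = ((ys'.length + 1 : Nat) : Int) := by push_cast; ring
          rw [hc, PySem.List.slice_from_natCast]
          exact List.drop_left' (by simp)
        have hstep : stepA a (ys' ++ [a] ++ zs, i) ((ys'.length : Int)) = (ys' ++ zs, i + 1) := by
          simp only [stepA, hget, hs1, hs2]
          simp
        rw [hstep, ih zs (i + 1)]
        simp [Prod.mk.injEq, List.filter_append, List.count_append]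
        ring
      · have hstep : stepA mv (ys' ++ [a] ++ zs, i) ((ys'.length : Int)) = (ys' ++ [a] ++ zs, i) := by
          simp only [stepA, hget, if_neg hav]
        rw [hstep, List.append_assoc, ih ([a] ++ zs) i]
        simp [List.filter_append, List.count_append, hav]

theorem removePass_eq (cl : List Int) (mv : Int) (i : Int) :
    removePass cl mv i
      = (cl.filter (fun x => decide (x ≠ mv)), i + (cl.count mv : Int)) := by
  have := removePass_core mv cl [] i
  simpa [removePass] using this

-- descending sorted distinct list: peeling off the maximum
theorem sortedDesc_cons (cl : List Int) (mv : Int)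
    (hmem : mv ∈ cl) (hub : ∀ x ∈ cl, x ≤ mv) :
    PySem.List.sorted (PySem.Set.ofList cl) (fun x => x) true
      = mv :: PySem.List.sorted
          (PySem.Set.ofList (cl.filter (fun x => decide (x ≠ mv)))) (fun x => x) true := by
  set cl' := cl.filter (fun x => decide (x ≠ mv)) with hcl'
  have hmem' : ∀ x, x ∈ cl' ↔ (x ∈ cl ∧ x ≠ mv) := by
    intro x; simp [hcl', List.mem_filter]
  have htail_nodup : (PySem.List.sorted (PySem.Set.ofList cl') (fun x => x) true).Nodup :=
    ((PySem.List.sorted_perm _ _ _).symm).nodup (PySem.Set.nodup_ofList _)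
  have hmem_tail : ∀ x, x ∈ PySem.List.sorted (PySem.Set.ofList cl') (fun x => x) true ↔
      (x ∈ cl ∧ x ≠ mv) := by
    intro x
    rw [PySem.List.mem_sorted, PySem.Set.mem_ofList]
    exact hmem' x
  apply PySem.List.sorted_rev_eq_of_perm_of_pairwise_gt
  · rw [List.perm_ext_iff_of_nodup _ (PySem.Set.nodup_ofList cl)]
    · intro x
      rw [PySem.Set.mem_ofList]
      constructor
      · intro hx
        rcases List.mem_cons.mp hx with rfl | hx
        · exact hmem
        · exact ((hmem_tail x).mp hx).1
      · intro hx
        by_cases hxm : x = mv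
        · exact hxm ▸ List.mem_cons_self
        · exact List.mem_cons_of_mem _ ((hmem_tail x).mpr ⟨hx, hxm⟩)
    · exact List.nodup_cons.mpr ⟨fun hc => ((hmem_tail mv).mp hc).2 rfl, htail_nodup⟩
  · rw [List.pairwise_cons]
    constructor
    · intro b hb
      rcases (hmem_tail b).mp hb with ⟨hbc, hbm⟩
      exact lt_of_le_of_ne (hub b hbc) hbm
    · have hle := PySem.List.sorted_pairwise_rev (PySem.Set.ofList cl') (fun x => x)
      have hne := List.nodup_iff_pairwise_ne.mp htail_nodup
      exact (hle.and hne).imp (fun h => lt_of_le_of_ne h.1 (Ne.symm h.2))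

theorem loopA_stop (f : Nat) (cl : List Int) (s i : Int) (h : ¬ i < 3) :
    loopA f cl s i = s := by
  cases f <;> simp [loopA, h]

theorem len_filter_count (l : List Int) (mv : Int) :
    (l.filter (fun x => decide (x ≠ mv))).length + l.count mv = l.length := by
  induction l with
  | nil => simp
  | cons h t ih =>
      simp only [ne_eq, decide_not] at ih ⊢
      by_cases hm : h = mv
      · simp [hm]; omega
      · simp [hm]; omega

-- A's outer loop equals B's walk over the descending distinct values, as long as the
-- already-removed counter i plus the remaining length covers the three required removals
theorem loopA_eq_goB (orig : List Int) : ∀ (fuel : Nat) (cl : List Int) (msum i : Int),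
    cl.length < fuel →
    (∀ v ∈ cl, cl.count v = orig.count v) →
    3 ≤ i + (cl.length : Int) →
    i < 3 →
    loopA fuel cl msum i
      = goB orig (PySem.List.sorted (PySem.Set.ofList cl) (fun x => x) true) msum i := by
  intro fuel
  induction fuel with
  | zero => intro cl msum i hf; omega
  | succ fuel ih =>
      intro cl msum i hf hc h3 hi
      match cl with
      | [] => simp at h3; omega
      | h :: t =>
        have hmem := maxFinder_mem h t
        have hub := maxFinder_ub h t
        set mv := maxFinder (h :: t) with hmv
        have hrp := removePass_eq (h :: t) mv i
        set cl' := (h :: t).filter (fun x => decide (x ≠ mv)) with hcl'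
        have hcpos : 0 < (h :: t).count mv := List.count_pos_iff.mpr hmem
        have hlen' : cl'.length + (h :: t).count mv = (h :: t).length :=
          len_filter_count (h :: t) mv
        have hcnt : (PySem.List.count orig mv : Int) = ((h :: t).count mv : Int) := by
          rw [PySem.List.count_eq orig mv, ← hc mv hmem]
        rw [sortedDesc_cons (h :: t) mv hmem hub]
        simp only [loopA, goB, if_pos hi]
        simp only [← hmv]
        rw [hrp, hcnt]
        by_cases hge : 3 ≤ i + ((h :: t).count mv : Int)
        · rw [if_pos hge]
          exact loopA_stop fuel cl' (msum + mv) _ (by omega)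
        · rw [if_neg hge]
          apply ih cl' (msum + mv) _ (by omega)
          · intro v hv
            rcases List.mem_filter.mp hv with ⟨hvc, hvd⟩
            rw [hcl', List.count_filter (p := fun x => decide (x ≠ mv)) hvd]
            exact hc v hvc
          · push_cast
            omega
          · omega

-- ===== VERDICT (by name: the statement is the Claim_ definition above) =====
theorem max_3_spec : Claim_equal_max_3 := by
  intro l _ hpre
  unfold Spec_max_3 max_3 max_3_alt
  exact loopA_eq_goB l (l.length + 1) l 0 0 (by omega)
    (fun v _ => rfl) (by unfold Pre_max_3 at hpre; omega) (by omega)
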